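-- pv_equiv track=rewrite | github.com/Apolinapolis/ubung_macht_den_meister | interview_tasks.py | get_unic_squares
-- ===== SOURCE A (Python) =====
-- def get_unic_squares(data:str)->list:
--     result = set()
--
--     for el in data.split():
--         try:
--             n = int(el)
--             result.add(n*n)
--         except ValueError:
--             pass
--
--     return sorted(result)
-- ===== SOURCE B (Python) =====
-- def get_unic_squares(data: str) -> list:
--     # Maintain the result as a sorted, duplicate-free list at every step:
--     # binary-search the insertion point of each square and insert it only
--     # if it is not already there.  No set, no final sort.
--     out = []
--     for el in data.split():
--         try:
--             n = int(el)
--         except ValueError: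
--             continue
--         sq = n * n
--         lo, hi = 0, len(out)
--         while lo < hi:
--             mid = (lo + hi) // 2
--             if out[mid] < sq:
--                 lo = mid + 1
--             else:
--                 hi = mid
--         if lo == len(out) or out[lo] != sq:
--             out.insert(lo, sq)
--     return out
-- ===== Notes on version B (the rewrite author's own statement) =====
-- stated objective: alternative
-- what changed: Instead of accumulating squares in a hash set and sorting at the end, B keeps the result sorted and duplicate-free at every step: it binary-searches the insertion point of each square in the list built so far and inserts it there only if absent (no set, no sort call).
import Mathlib
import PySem

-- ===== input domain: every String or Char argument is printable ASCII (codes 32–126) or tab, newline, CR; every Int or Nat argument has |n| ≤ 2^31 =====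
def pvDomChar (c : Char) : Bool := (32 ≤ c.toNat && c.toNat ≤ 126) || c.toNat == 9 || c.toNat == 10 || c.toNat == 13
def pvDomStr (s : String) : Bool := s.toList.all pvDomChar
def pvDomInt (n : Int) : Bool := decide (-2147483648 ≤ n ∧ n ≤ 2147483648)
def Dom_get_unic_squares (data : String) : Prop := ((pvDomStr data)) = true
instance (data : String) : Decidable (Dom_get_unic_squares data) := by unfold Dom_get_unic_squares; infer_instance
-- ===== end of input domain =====

-- B replaces A's set-then-sort by incremental sorted insertion: it keeps the result
-- sorted and duplicate-free throughout, binary-searching each square's position by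
-- hand and inserting only if absent (objective: alternative).

-- ===== PORT A =====
def get_unic_squares (data : String) : List Int :=
  let result : PySem.Set Int :=
    (PySem.Str.split₀ data).foldl
      (fun result el =>
        match PySem.Int.ofStr? el with
        | some n => PySem.Set.add result (n * n)
        | none => result)
      PySem.Set.empty
  PySem.List.sorted result (fun x => x) false

-- ===== PORT B =====
-- Transliteration of Source B's 'while lo < hi' binary-search loop; lo and hi are
-- nonnegative Python ints, so Nat with Nat division is exact for (lo + hi) // 2,
-- and out[mid] is always in range (getD's default is never used).
def pvBisect (out : List Int) (sq : Int) (lo hi : Nat) : Nat :=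
  if h : lo < hi then
    let mid := (lo + hi) / 2
    if out.getD mid 0 < sq then pvBisect out sq (mid + 1) hi
    else pvBisect out sq lo mid
  else lo
termination_by hi - lo
decreasing_by all_goals omega

def get_unic_squares_alt (data : String) : List Int :=
  (PySem.Str.split₀ data).foldl
    (fun out el =>
      match PySem.Int.ofStr? el with
      | some n =>
        let sq := n * n
        let lo := pvBisect out sq 0 out.length
        if lo == out.length || !(out.getD lo 0 == sq) then out.insertIdx lo sq else out
      | none => out)
    []

-- ===== PRECONDITION & SPEC =====
def Spec_get_unic_squares (data : String) (out : List Int) : Prop := out = get_unic_squares_alt data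
instance (data : String) (out : List Int) : Decidable (Spec_get_unic_squares data out) := by unfold Spec_get_unic_squares; infer_instance

-- ===== CLAIM =====
def Claim_equal_get_unic_squares : Prop := ∀ (data : String), Dom_get_unic_squares data → Spec_get_unic_squares data (get_unic_squares data)

-- ===== LEMMAS AND PROOFS =====

-- The squares of the tokens that parse, in token order.
def pvSquares (toks : List String) : List Int :=
  toks.filterMap (fun el => (PySem.Int.ofStr? el).map (fun n => n * n))

-- A's set fold collects exactly the parsed squares.
theorem pv_setFold_eq_ofList (toks : List String) :
    ∀ (s : List Int),
      toks.foldl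
        (fun result el =>
          match PySem.Int.ofStr? el with
          | some n => PySem.Set.add result (n * n)
          | none => result)
        (PySem.Set.ofList s)
      = PySem.Set.ofList (s ++ pvSquares toks) := by
  induction toks with
  | nil => intro s; simp [pvSquares]
  | cons t ts ih =>
    intro s
    simp only [List.foldl_cons]
    cases h : PySem.Int.ofStr? t with
    | none => simpa [pvSquares, h] using ih s
    | some n =>
      have hadd : PySem.Set.add (PySem.Set.ofList s) (n * n) = PySem.Set.ofList (s ++ [n * n]) := by
        simp [PySem.Set.ofList_eq_foldl, List.foldl_append]
      dsimp only
      rw [hadd, ih (s ++ [n * n])]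
      simp [pvSquares, h]

-- insertIdx at an in-range position is take ++ [x] ++ drop.
theorem pv_insertIdx_eq (l : List Int) (n : Nat) (x : Int) (h : n ≤ l.length) :
    l.insertIdx n x = l.take n ++ x :: l.drop n := by
  induction l generalizing n with
  | nil => simp at h; subst h; simp
  | cons a as ih =>
    cases n with
    | zero => simp
    | succ m => simp [List.insertIdx_succ_cons, ih m (by simpa using h)]

-- Invariant spec of the hand-written binary search: it returns a position r in
-- [lo, hi] splitting out into values < sq (before r) and values ≥ sq (from r on),
-- provided out is ≤-monotone and the bracketing hypotheses hold at lo and hi.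
theorem pvBisect_spec (out : List Int) (sq : Int)
    (hs : ∀ i j, i < out.length → j < out.length → i ≤ j → out.getD i 0 ≤ out.getD j 0) :
    ∀ (d lo hi : Nat), hi - lo = d → lo ≤ hi → hi ≤ out.length →
      (∀ i, i < lo → out.getD i 0 < sq) →
      (∀ i, hi ≤ i → i < out.length → sq ≤ out.getD i 0) →
      pvBisect out sq lo hi ≤ out.length ∧
      (∀ i, i < pvBisect out sq lo hi → out.getD i 0 < sq) ∧
      (∀ i, pvBisect out sq lo hi ≤ i → i < out.length → sq ≤ out.getD i 0) := by
  intro d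
  induction d using Nat.strong_induction_on with
  | _ d ih =>
    intro lo hi hd hlohi hhil hlow hhigh
    rw [pvBisect]
    by_cases h : lo < hi
    · rw [dif_pos h]
      set mid := (lo + hi) / 2 with hmid
      have hmid1 : lo ≤ mid := by omega
      have hmid2 : mid < hi := by omega
      by_cases hc : out.getD mid 0 < sq
      · rw [if_pos hc]
        refine ih (hi - (mid + 1)) (by omega) (mid + 1) hi rfl (by omega) hhil ?_ hhigh
        intro i hi'
        by_cases hil : i < lo
        · exact hlow i hil
        · have : out.getD i 0 ≤ out.getD mid 0 := hs i mid (by omega) (by omega) (by omega)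
          omega
      · rw [if_neg hc]
        refine ih (mid - lo) (by omega) lo mid rfl (by omega) (by omega) hlow ?_
        intro i hi1 hi2
        have : out.getD mid 0 ≤ out.getD i 0 := hs mid i (by omega) hi2 hi1
        omega
    · rw [dif_neg h]
      exact ⟨by omega, fun i hi' => hlow i (by omega), fun i hi1 hi2 => hhigh i (by omega) hi2⟩

-- One insertion step of B preserves strict sortedness and adds sq to the members.
theorem pv_step_spec (out : List Int) (sq : Int) (hout : out.Pairwise (· < ·)) :
    ((if pvBisect out sq 0 out.length == out.length
        || !(out.getD (pvBisect out sq 0 out.length) 0 == sq)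
      then out.insertIdx (pvBisect out sq 0 out.length) sq else out).Pairwise (· < ·))
    ∧ (∀ z, z ∈ (if pvBisect out sq 0 out.length == out.length
        || !(out.getD (pvBisect out sq 0 out.length) 0 == sq)
      then out.insertIdx (pvBisect out sq 0 out.length) sq else out) ↔ z ∈ out ∨ z = sq) := by
  have hmono : ∀ i j, i < out.length → j < out.length → i ≤ j → out.getD i 0 ≤ out.getD j 0 := by
    intro i j hi hj hij
    rcases Nat.eq_or_lt_of_le hij with rfl | hij'
    · exact le_refl _
    · rw [List.getD_eq_getElem _ _ hi, List.getD_eq_getElem _ _ hj]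
      exact le_of_lt (List.pairwise_iff_getElem.mp hout i j hi hj hij')
  obtain ⟨hrlen, hlt, hge⟩ :=
    pvBisect_spec out sq hmono (out.length - 0) 0 out.length rfl (Nat.zero_le _) le_rfl
      (by omega) (fun i hi1 hi2 => absurd hi2 (by omega))
  set r := pvBisect out sq 0 out.length with hr
  by_cases hc : (r == out.length || !(out.getD r 0 == sq)) = true
  · rw [if_pos hc]
    -- sq is not in out
    have hnot : sq ∉ out := by
      intro hmem
      obtain ⟨i, hi, hieq⟩ := List.mem_iff_getElem.mp hmem
      have hgd : out.getD i 0 = sq := by rw [List.getD_eq_getElem _ _ hi]; exact hieq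
      have hri : r ≤ i := by
        by_contra hcon
        have := hlt i (by omega); omega
      simp only [Bool.or_eq_true, beq_iff_eq, Bool.not_eq_true', beq_eq_false_iff_ne] at hc
      rcases hc with hc | hc
      · omega
      · have h1 : sq ≤ out.getD r 0 := hge r le_rfl (by omega)
        have h2 : out.getD r 0 ≤ out.getD i 0 := hmono r i (by omega) hi hri
        omega
    have hne : ∀ i, i < out.length → out.getD i 0 ≠ sq := by
      intro i h heq
      rw [List.getD_eq_getElem _ _ h] at heq
      exact hnot (heq ▸ List.getElem_mem h)
    constructor
    · -- strict sortedness of out.insertIdx r sq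
      rw [pv_insertIdx_eq _ _ _ hrlen]
      have hsplit : out = out.take r ++ out.drop r := (List.take_append_drop r out).symm
      have hpair : (out.take r ++ out.drop r).Pairwise (· < ·) := hsplit ▸ hout
      rw [List.pairwise_append] at hpair
      obtain ⟨hp1, hp2, hp3⟩ := hpair
      rw [List.pairwise_append]
      refine ⟨hp1, ?_, ?_⟩
      · rw [List.pairwise_cons]
        refine ⟨?_, hp2⟩
        intro b hb
        obtain ⟨k, hk, hkeq⟩ := List.mem_iff_getElem.mp hb
        have hlen : k + r < out.length := by
          have := out.length_drop (i := r); omega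
        have hbval : b = out.getD (r + k) 0 := by
          rw [List.getD_eq_getElem _ _ (by omega)]
          rw [← hkeq, List.getElem_drop]
        have h1 : sq ≤ out.getD (r + k) 0 := hge (r + k) (by omega) (by omega)
        have h2 : out.getD (r + k) 0 ≠ sq := hne (r + k) (by omega)
        omega
      · intro a ha b hb
        obtain ⟨k, hk, hkeq⟩ := List.mem_iff_getElem.mp ha
        have hkl : k < out.length := by
          have := out.length_take (i := r); omega
        have haval : a = out.getD k 0 := by
          rw [List.getD_eq_getElem _ _ hkl, ← hkeq, List.getElem_take]
        have hkr : k < r := by have := out.length_take (i := r); omega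
        have halt : a < sq := haval ▸ hlt k hkr
        rcases List.mem_cons.mp hb with rfl | hb'
        · exact halt
        · exact lt_trans halt (by
            obtain ⟨m, hm, hmeq⟩ := List.mem_iff_getElem.mp hb'
            have hlenm : m + r < out.length := by have := out.length_drop (i := r); omega
            have hbval : b = out.getD (r + m) 0 := by
              rw [List.getD_eq_getElem _ _ (by omega), ← hmeq, List.getElem_drop]
            have h1 : sq ≤ out.getD (r + m) 0 := hge (r + m) (by omega) (by omega)
            have h2 : out.getD (r + m) 0 ≠ sq := hne (r + m) (by omega)
            omega)
    · intro z
      rw [List.mem_insertIdx hrlen]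
      tauto
  · rw [if_neg hc]
    -- skipped: r < len and out[r] = sq, so sq ∈ out already
    have hmem : sq ∈ out := by
      simp only [Bool.or_eq_true, beq_iff_eq, Bool.not_eq_true', beq_eq_false_iff_ne,
        not_or, not_not, ne_eq] at hc
      obtain ⟨hne, heq⟩ := hc
      have hrl : r < out.length := by omega
      rw [List.getD_eq_getElem _ _ hrl] at heq
      exact heq ▸ List.getElem_mem hrl
    refine ⟨hout, fun z => ?_⟩
    constructor
    · exact fun h => Or.inl h
    · rintro (h | rfl)
      · exact h
      · exact hmem

-- B's fold keeps a strictly sorted list whose members are the accumulator's plus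
-- the parsed squares of the remaining tokens.
theorem pv_fold_spec (toks : List String) :
    ∀ (out : List Int), out.Pairwise (· < ·) →
      (toks.foldl
        (fun out el =>
          match PySem.Int.ofStr? el with
          | some n =>
            let sq := n * n
            let lo := pvBisect out sq 0 out.length
            if lo == out.length || !(out.getD lo 0 == sq) then out.insertIdx lo sq else out
          | none => out)
        out).Pairwise (· < ·)
      ∧ (∀ z, z ∈ toks.foldl
          (fun out el =>
            match PySem.Int.ofStr? el with
            | some n =>
              let sq := n * n
              let lo := pvBisect out sq 0 out.length
              if lo == out.length || !(out.getD lo 0 == sq) then out.insertIdx lo sq else out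
            | none => out)
          out ↔ z ∈ out ∨ z ∈ pvSquares toks) := by
  induction toks with
  | nil => intro out h; exact ⟨h, by simp [pvSquares]⟩
  | cons t ts ih =>
    intro out hout
    simp only [List.foldl_cons]
    cases h : PySem.Int.ofStr? t with
    | none =>
      obtain ⟨h1, h2⟩ := ih out hout
      exact ⟨h1, fun z => by rw [h2 z]; simp [pvSquares, h]⟩
    | some n =>
      obtain ⟨hstep, hstepm⟩ := pv_step_spec out (n * n) hout
      obtain ⟨h1, h2⟩ := ih _ hstep
      refine ⟨h1, fun z => ?_⟩
      rw [h2 z, hstepm z]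
      simp only [pvSquares, List.filterMap_cons, h, Option.map_some]
      simp
      tauto

-- ===== VERDICT =====
theorem get_unic_squares_spec : Claim_equal_get_unic_squares := by
  intro data _
  unfold Spec_get_unic_squares get_unic_squares get_unic_squares_alt
  set toks := PySem.Str.split₀ data with htoks
  have hA :
      toks.foldl
        (fun result el =>
          match PySem.Int.ofStr? el with
          | some n => PySem.Set.add result (n * n)
          | none => result)
        PySem.Set.empty = PySem.Set.ofList (pvSquares toks) := by
    simpa using pv_setFold_eq_ofList toks []
  simp only [hA]
  obtain ⟨hBlt, hBmem⟩ := pv_fold_spec toks [] (by simp)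
  set B := toks.foldl
      (fun out el =>
        match PySem.Int.ofStr? el with
        | some n =>
          let sq := n * n
          let lo := pvBisect out sq 0 out.length
          if lo == out.length || !(out.getD lo 0 == sq) then out.insertIdx lo sq else out
        | none => out)
      [] with hBdef
  have hperm : B.Perm (PySem.Set.ofList (pvSquares toks)) := by
    rw [List.perm_ext_iff_of_nodup (hBlt.imp fun h => ne_of_lt h) (PySem.Set.nodup_ofList _)]
    intro z
    rw [hBmem z, PySem.Set.mem_ofList]
    simp
  exact (PySem.List.sorted_eq_of_perm_of_pairwise_lt _ _ _ hperm hBlt).symm ▸ rfl
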